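-- pv_equiv track=rewrite | github.com/claha/advent-of-code | 2020/19/solve.py | expand_exp
-- ===== SOURCE A (Python) =====
-- def expand_exp(exp):
--     """Expand expression."""
--     eexp = {""}
--     i = 0
--     while i < len(exp):
--         if exp[i] == "(":
--             count = 0
--             j = i + 1
--             while j < len(exp):
--                 if exp[j] == "(":
--                     count += 1
--                 elif exp[j] == ")":
--                     if count == 0:
--                         break
--                     count -= 1
--                 j += 1
--             sub_eexp = expand_exp(exp[i + 1 : j])
--             i = j + 1
--             new_eexp = set()
--             if "" in eexp:
--                 eexp.remove("")
--                 for j in sub_eexp: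
--                     eexp.add(j)
--             else:
--                 for j in eexp:
--                     for k in sub_eexp:
--                         new_eexp.add(j + k)
--                 eexp = new_eexp
--         elif exp[i] == "|":
--             eexp.add("")
--             i += 1
--         else:
--             new_eexp = set()
--             for j in eexp:
--                 new_eexp.add(j + exp[i])
--             eexp = new_eexp
--             i += 1
--
--     return eexp
-- ===== SOURCE B (Python) =====
-- def expand_exp(exp):
--     """Expand expression (single linear pass with an explicit stack of sets).
--
--     Raises IndexError on an unmatched ')' (the original treats it as a literal
--     character); such inputs are excluded by Pre_.
--     """
--     cur = {""}
--     stack = []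
--     for ch in exp:
--         if ch == "(":
--             stack.append(cur)
--             cur = {""}
--         elif ch == ")":
--             cur = _combine(stack.pop(), cur)
--         elif ch == "|":
--             cur.add("")
--         else:
--             cur = {s + ch for s in cur}
--     while stack:
--         cur = _combine(stack.pop(), cur)
--     return cur
--
--
-- def _combine(parent, sub):
--     if "" in parent:
--         parent.remove("")
--         for s in sub:
--             parent.add(s)
--         return parent
--     return {p + s for p in parent for s in sub}
-- ===== Notes on version B (the rewrite author's own statement) =====
-- stated objective: alternative
-- what changed: Replaced the recursion-plus-matching-paren-rescan with a single left-to-right pass that keeps an explicit stack of parent sets, combining on each ')' (and at end-of-input for unclosed '('), so the string is scanned once and no substring is re-scanned or recursed on.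
-- outside the precondition, e.g. on expand_exp(')'): A returns {')'}, B raises IndexError
import Mathlib
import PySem

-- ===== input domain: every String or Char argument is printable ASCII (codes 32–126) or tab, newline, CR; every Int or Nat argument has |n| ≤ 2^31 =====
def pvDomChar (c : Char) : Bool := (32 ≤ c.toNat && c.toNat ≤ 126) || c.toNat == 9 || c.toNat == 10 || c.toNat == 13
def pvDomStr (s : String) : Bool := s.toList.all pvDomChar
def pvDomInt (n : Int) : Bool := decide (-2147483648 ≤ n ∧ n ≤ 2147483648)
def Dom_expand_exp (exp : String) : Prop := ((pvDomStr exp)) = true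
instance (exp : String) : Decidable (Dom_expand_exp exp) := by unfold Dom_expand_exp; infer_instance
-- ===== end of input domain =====

-- B replaces A's recursion-plus-matching-paren-rescan by one linear pass with an explicit
-- stack of parent sets (objective: alternative decomposition; same set operations).

-- ===== PORT A =====
-- A's inner while loop: scan for the matching ')' (count = nesting), returning
-- (exp[i+1:j], exp[j+1:]) — the characters before the break and those after it.
def pvFindClose : List Char → Nat → List Char × List Char
  | [], _ => ([], [])
  | c :: t, count =>
    if c = '(' then
      let p := pvFindClose t (count + 1); (c :: p.1, p.2)
    else if c = ')' then
      if count = 0 then ([], t)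
      else
        let p := pvFindClose t (count - 1); (c :: p.1, p.2)
    else
      let p := pvFindClose t count; (c :: p.1, p.2)

-- termination fact for the port's recursion on the two pieces
theorem pvFindClose_len (t : List Char) (n : Nat) :
    (pvFindClose t n).1.length + (pvFindClose t n).2.length ≤ t.length := by
  induction t generalizing n with
  | nil => simp [pvFindClose]
  | cons c t ih =>
    by_cases h1 : c = '('
    · have := ih (n + 1); simp only [pvFindClose, if_pos h1]; simp; omega
    · by_cases h2 : c = ')'
      · by_cases h3 : n = 0
        · simp [pvFindClose, h2, h3]
        · have := ih (n - 1); simp only [pvFindClose, if_neg h1, if_pos h2, if_neg h3]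
          simp; omega
      · have := ih n; simp only [pvFindClose, if_neg h1, if_neg h2]; simp; omega

-- A's main while loop, as structural recursion over the remaining characters with
-- the same state eexp; the '(' branch recurses on the substring like A does.
def pvExpandA : PySem.Set String → List Char → PySem.Set String
  | eexp, [] => eexp
  | eexp, c :: t =>
    if c = '(' then
      let p := pvFindClose t 0
      let sub := pvExpandA (PySem.Set.ofList [""]) p.1
      let eexp' :=
        if PySem.Set.contains eexp "" then
          sub.foldl PySem.Set.add (PySem.Set.discard eexp "")
        else
          eexp.foldl (fun acc j => sub.foldl (fun acc k => PySem.Set.add acc (j ++ k)) acc)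
            PySem.Set.empty
      pvExpandA eexp' p.2
    else if c = '|' then pvExpandA (PySem.Set.add eexp "") t
    else pvExpandA (eexp.foldl (fun acc j => PySem.Set.add acc (j.push c)) PySem.Set.empty) t
termination_by _ l => l.length
decreasing_by
  · have := pvFindClose_len t 0; simp only [List.length_cons]; omega
  · have := pvFindClose_len t 0; simp only [List.length_cons]; omega
  · simp
  · simp

def expand_exp (exp : String) : List String :=
  pvExpandA (PySem.Set.ofList [""]) exp.toList

-- ===== PORT B =====
-- B's _combine helper
def pvCombineB (parent sub : PySem.Set String) : PySem.Set String :=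
  if PySem.Set.contains parent "" then
    sub.foldl PySem.Set.add (PySem.Set.discard parent "")
  else
    parent.foldl (fun acc p => sub.foldl (fun acc s => PySem.Set.add acc (p ++ s)) acc)
      PySem.Set.empty

-- B's final 'while stack:' loop
def pvPopAll : List (PySem.Set String) → PySem.Set String → PySem.Set String
  | [], cur => cur
  | p :: st, cur => pvPopAll st (pvCombineB p cur)

-- B's single for-loop over the characters, carrying (stack, cur)
def pvExpandB : List (PySem.Set String) → PySem.Set String → List Char → PySem.Set String
  | stack, cur, [] => pvPopAll stack cur
  | stack, cur, c :: t =>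
    if c = '(' then pvExpandB (cur :: stack) (PySem.Set.ofList [""]) t
    else if c = ')' then
      match stack with
      | [] => cur -- Python's stack.pop() raises IndexError here; outside Pre_
      | p :: st => pvExpandB st (pvCombineB p cur) t
    else if c = '|' then pvExpandB stack (PySem.Set.add cur "") t
    else pvExpandB stack (cur.foldl (fun acc s => PySem.Set.add acc (s.push c)) PySem.Set.empty) t

def expand_exp_alt (exp : String) : List String :=
  pvExpandB [] (PySem.Set.ofList [""]) exp.toList

-- ===== PRECONDITION & SPEC =====
-- Pre_ excludes strings with an unmatched ')' (a prefix with more ')' than '('): there A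
-- appends the stray ')' as a literal character while B's stack.pop() raises IndexError.
def Pre_expand_exp (exp : String) : Prop :=
  ∀ p ∈ exp.toList.inits, p.count ')' ≤ p.count '('

instance (exp : String) : Decidable (Pre_expand_exp exp) := by
  unfold Pre_expand_exp; infer_instance

def pvWitness_expand_exp : String := "a(b|c)d"

def Spec_expand_exp (exp : String) (out : List String) : Prop := out = expand_exp_alt exp
instance (exp : String) (out : List String) : Decidable (Spec_expand_exp exp out) := by
  unfold Spec_expand_exp; infer_instance

-- ===== CLAIM (what is proved, stated in full; the proofs are below) =====
def Claim_equal_expand_exp : Prop :=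
  ∀ (exp : String), Dom_expand_exp exp → Pre_expand_exp exp →
    Spec_expand_exp exp (expand_exp exp)

-- ===== LEMMAS AND PROOFS =====

-- final paren depth starting from n; none ⇔ some ')' closes below depth 0
def pvfd : List Char → Nat → Option Nat
  | [], n => some n
  | c :: t, n =>
    if c = '(' then pvfd t (n + 1)
    else if c = ')' then (if n = 0 then none else pvfd t (n - 1))
    else pvfd t n

theorem pvfd_succ (t : List Char) (n d : Nat) (h : pvfd t n = some d) :
    pvfd t (n + 1) = some (d + 1) := by
  induction t generalizing n with
  | nil => simp [pvfd] at h ⊢; omega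
  | cons c t ih =>
    by_cases h1 : c = '('
    · simp only [pvfd, if_pos h1] at h ⊢; exact ih _ h
    · by_cases h2 : c = ')'
      · by_cases h3 : n = 0
        · simp [pvfd, h2, h3] at h
        · simp only [pvfd, if_neg h1, if_pos h2, if_neg h3] at h
          obtain ⟨m, rfl⟩ := Nat.exists_eq_succ_of_ne_zero h3
          simp only [pvfd, if_neg h1, if_pos h2]
          simp only [Nat.succ_sub_one] at h ⊢
          simp only [Nat.succ_ne_zero, if_false]
          exact ih _ h
      · simp only [pvfd, if_neg h1, if_neg h2] at h ⊢; exact ih _ h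

theorem pvfd_append_some (x y : List Char) (n d : Nat) (h : pvfd x n = some d) :
    pvfd (x ++ y) n = pvfd y d := by
  induction x generalizing n with
  | nil => simp [pvfd] at h; simp [h]
  | cons c t ih =>
    by_cases h1 : c = '('
    · simp only [pvfd, List.cons_append, if_pos h1] at h ⊢; exact ih _ h
    · by_cases h2 : c = ')'
      · by_cases h3 : n = 0
        · simp [pvfd, h2, h3] at h
        · simp only [pvfd, List.cons_append, if_neg h1, if_pos h2, if_neg h3] at h ⊢
          exact ih _ h
      · simp only [pvfd, List.cons_append, if_neg h1, if_neg h2] at h ⊢; exact ih _ h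

theorem pvFindClose_total (t : List Char) (n d : Nat) (h : pvfd t n = some d) :
    pvFindClose t n = (t, []) := by
  induction t generalizing n with
  | nil => simp [pvFindClose]
  | cons c t ih =>
    by_cases h1 : c = '('
    · simp only [pvfd, if_pos h1] at h
      simp [pvFindClose, h1, ih _ h]
    · by_cases h2 : c = ')'
      · by_cases h3 : n = 0
        · simp [pvfd, h2, h3] at h
        · simp only [pvfd, if_neg h1, if_pos h2, if_neg h3] at h
          simp [pvFindClose, h2, h3, ih _ h]
      · simp only [pvfd, if_neg h1, if_neg h2] at h
        simp [pvFindClose, h1, h2, ih _ h]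

theorem pvFindClose_split (t : List Char) (n : Nat) (h : pvfd t n = none) :
    t = (pvFindClose t n).1 ++ ')' :: (pvFindClose t n).2 ∧
      pvfd (pvFindClose t n).1 n = some 0 := by
  induction t generalizing n with
  | nil => simp [pvfd] at h
  | cons c t ih =>
    by_cases h1 : c = '('
    · simp only [pvfd, if_pos h1] at h
      have H := ih (n + 1) h
      refine ⟨?_, ?_⟩
      · simpa [pvFindClose, h1] using H.1
      · simpa [pvFindClose, pvfd, h1] using H.2
    · by_cases h2 : c = ')'
      · by_cases h3 : n = 0
        · simp [pvFindClose, pvfd, h2, h3]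
        · simp only [pvfd, if_neg h1, if_pos h2, if_neg h3] at h
          have H := ih (n - 1) h
          refine ⟨?_, ?_⟩
          · simpa [pvFindClose, h1, h2, h3] using H.1
          · simpa [pvFindClose, pvfd, h1, h2, h3] using H.2
      · simp only [pvfd, if_neg h1, if_neg h2] at h
        have H := ih n h
        refine ⟨?_, ?_⟩
        · simpa [pvFindClose, h1, h2] using H.1
        · simpa [pvFindClose, pvfd, h1, h2] using H.2

theorem pvPre_fd (l : List Char) (n : Nat)
    (h : ∀ p ∈ l.inits, p.count ')' ≤ p.count '(' + n) : pvfd l n ≠ none := by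
  induction l generalizing n with
  | nil => simp [pvfd]
  | cons c t ih =>
    simp only [pvfd]
    split_ifs with h1 h2 h3
    · exact ih _ (fun p hp => by
        have := h (c :: p) (by simp [hp])
        simp [h1] at this ⊢; omega)
    · have := h [c] (by simp)
      simp [h2] at this; omega
    · exact ih _ (fun p hp => by
        have := h (c :: p) (by simp [hp])
        have hn : n ≠ 0 := h3
        simp [h2] at this ⊢; omega)
    · exact ih _ (fun p hp => by
        have := h (c :: p) (by simp [hp])
        simp [h1, h2] at this ⊢; omega)


theorem pvExpandA_nil (cur : PySem.Set String) : pvExpandA cur [] = cur := by simp [pvExpandA]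

theorem pvExpandA_paren (cur : PySem.Set String) (t : List Char) :
    pvExpandA cur ('(' :: t) =
      pvExpandA (pvCombineB cur (pvExpandA (PySem.Set.ofList [""]) (pvFindClose t 0).1))
        (pvFindClose t 0).2 := by
  rw [pvExpandA]; simp [pvCombineB]

theorem pvExpandA_bar (cur : PySem.Set String) (t : List Char) :
    pvExpandA cur ('|' :: t) = pvExpandA (PySem.Set.add cur "") t := by
  rw [pvExpandA]; simp

theorem pvExpandA_char (cur : PySem.Set String) (c : Char) (t : List Char)
    (h1 : c ≠ '(') (h3 : c ≠ '|') :
    pvExpandA cur (c :: t) =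
      pvExpandA (cur.foldl (fun acc j => PySem.Set.add acc (j.push c)) PySem.Set.empty) t := by
  rw [pvExpandA]; simp [h1, h3]

-- the compositional law for B over a fully balanced block a
theorem pvE (N : Nat) : ∀ a : List Char, a.length ≤ N → pvfd a 0 = some 0 →
    ∀ b cur stack, pvExpandB stack cur (a ++ b) = pvExpandB stack (pvExpandA cur a) b := by
  induction N with
  | zero =>
    intro a ha _ b cur stack
    have : a = [] := List.eq_nil_of_length_eq_zero (Nat.le_zero.mp ha)
    subst this
    simp [pvExpandA_nil]
  | succ N ih =>
    intro a ha hfd b cur stack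
    match a with
    | [] => simp [pvExpandA_nil]
    | c :: t =>
      by_cases h1 : c = '('
      · subst h1
        have hfd1 : pvfd t 1 = some 0 := by simpa [pvfd] using hfd
        have ht0 : pvfd t 0 = none := by
          cases h0 : pvfd t 0 with
          | none => rfl
          | some d =>
            have := pvfd_succ t 0 d h0
            rw [hfd1] at this; simp at this
        obtain ⟨hsplit, hbal⟩ := pvFindClose_split t 0 ht0
        have hlen : t.length = (pvFindClose t 0).1.length + (pvFindClose t 0).2.length + 1 := by
          conv_lhs => rw [hsplit]
          simp
          omega
        have htN : t.length ≤ N := by simpa using ha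
        have hr0 : pvfd (pvFindClose t 0).2 0 = some 0 := by
          have h1' : pvfd (pvFindClose t 0).1 1 = some 1 := pvfd_succ _ _ _ hbal
          have := pvfd_append_some (pvFindClose t 0).1 (')' :: (pvFindClose t 0).2) 1 1 h1'
          rw [← hsplit] at this
          rw [hfd1] at this
          simp [pvfd] at this
          exact this.symm
        have step1 : ('(' :: t) ++ b =
            '(' :: ((pvFindClose t 0).1 ++ (')' :: ((pvFindClose t 0).2 ++ b))) := by
          conv_lhs => rw [hsplit]
          simp
        rw [step1]
        show pvExpandB (cur :: stack) (PySem.Set.ofList [""])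
              ((pvFindClose t 0).1 ++ (')' :: ((pvFindClose t 0).2 ++ b))) =
            pvExpandB stack (pvExpandA cur ('(' :: t)) b
        rw [ih (pvFindClose t 0).1 (by omega) hbal]
        show pvExpandB stack
              (pvCombineB cur (pvExpandA (PySem.Set.ofList [""]) (pvFindClose t 0).1))
              ((pvFindClose t 0).2 ++ b) = _
        rw [ih (pvFindClose t 0).2 (by omega) hr0]
        rw [pvExpandA_paren]
      · by_cases h2 : c = ')'
        · subst h2
          simp [pvfd] at hfd
        · by_cases h3 : c = '|'
          · subst h3
            have hfd' : pvfd t 0 = some 0 := by simpa [pvfd] using hfd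
            have := ih t (by simpa using ha) hfd' b (PySem.Set.add cur "") stack
            rw [pvExpandA_bar]
            simpa [pvExpandB] using this
          · have hfd' : pvfd t 0 = some 0 := by simpa [pvfd, h1, h2, h3] using hfd
            have := ih t (by simpa using ha) hfd' b
              (cur.foldl (fun acc s => PySem.Set.add acc (s.push c)) PySem.Set.empty) stack
            rw [pvExpandA_char cur c t h1 h3]
            rw [List.cons_append]
            rw [show pvExpandB stack cur (c :: (t ++ b)) =
              pvExpandB stack (cur.foldl (fun acc s => PySem.Set.add acc (s.push c)) PySem.Set.empty) (t ++ b) by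
                simp [pvExpandB, h1, h2, h3]]
            exact this

theorem pvM (N : Nat) : ∀ l : List Char, l.length ≤ N → pvfd l 0 ≠ none →
    ∀ cur stack, pvExpandB stack cur l = pvPopAll stack (pvExpandA cur l) := by
  induction N with
  | zero =>
    intro l hl _ cur stack
    have : l = [] := List.eq_nil_of_length_eq_zero (Nat.le_zero.mp hl)
    subst this
    simp [pvExpandA_nil, pvExpandB]
  | succ N ih =>
    intro l hl hfd cur stack
    match l with
    | [] => simp [pvExpandA_nil, pvExpandB]
    | c :: t =>
      by_cases h1 : c = '('
      · subst h1
        simp only [pvfd, reduceIte] at hfd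
        cases h0 : pvfd t 0 with
        | none =>
          obtain ⟨hsplit, hbal⟩ := pvFindClose_split t 0 h0
          have htN : t.length ≤ N := by simpa using hl
          have hlen : t.length = (pvFindClose t 0).1.length + (pvFindClose t 0).2.length + 1 := by
            conv_lhs => rw [hsplit]
            simp
            omega
          have hr0 : pvfd (pvFindClose t 0).2 0 ≠ none := by
            have h1' : pvfd (pvFindClose t 0).1 1 = some 1 := pvfd_succ _ _ _ hbal
            have := pvfd_append_some (pvFindClose t 0).1 (')' :: (pvFindClose t 0).2) 1 1 h1'
            rw [← hsplit] at this
            simp [pvfd] at this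
            rw [this] at hfd
            exact hfd
          have step1 : pvExpandB stack cur ('(' :: t) =
              pvExpandB (cur :: stack) (PySem.Set.ofList [""])
                ((pvFindClose t 0).1 ++ (')' :: (pvFindClose t 0).2)) := by
            conv_lhs => rw [hsplit]
            simp [pvExpandB]
          rw [step1]
          rw [pvE N (pvFindClose t 0).1 (by omega) hbal]
          show pvExpandB stack
              (pvCombineB cur (pvExpandA (PySem.Set.ofList [""]) (pvFindClose t 0).1))
              (pvFindClose t 0).2 = _
          rw [ih (pvFindClose t 0).2 (by omega) hr0]
          rw [pvExpandA_paren]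
        | some d =>
          have htot := pvFindClose_total t 0 d h0
          have hB : pvExpandB stack cur ('(' :: t) =
              pvExpandB (cur :: stack) (PySem.Set.ofList [""]) t := by simp [pvExpandB]
          rw [hB, ih t (by simpa using hl) (by rw [h0]; simp) (PySem.Set.ofList [""]) (cur :: stack)]
          rw [pvExpandA_paren]
          rw [htot]
          simp only [pvExpandA_nil]
          rfl
      · by_cases h2 : c = ')'
        · subst h2
          simp [pvfd] at hfd
        · by_cases h3 : c = '|'
          · subst h3
            have hfd' : pvfd t 0 ≠ none := by simpa [pvfd] using hfd
            rw [pvExpandA_bar]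
            rw [show pvExpandB stack cur ('|' :: t) =
              pvExpandB stack (PySem.Set.add cur "") t by simp [pvExpandB]]
            exact ih t (by simpa using hl) hfd' _ stack
          · have hfd' : pvfd t 0 ≠ none := by simpa [pvfd, h1, h2, h3] using hfd
            rw [pvExpandA_char cur c t h1 h3]
            rw [show pvExpandB stack cur (c :: t) =
              pvExpandB stack (cur.foldl (fun acc s => PySem.Set.add acc (s.push c)) PySem.Set.empty) t by
                simp [pvExpandB, h1, h2, h3]]
            exact ih t (by simpa using hl) hfd' _ stack

-- ===== VERDICT (by name: the statement is the Claim_ definition above) =====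
theorem expand_exp_spec : Claim_equal_expand_exp := by
  intro exp _ hpre
  unfold Spec_expand_exp expand_exp expand_exp_alt
  have hfd : pvfd exp.toList 0 ≠ none :=
    pvPre_fd _ 0 (fun p hp => by simpa using hpre p hp)
  exact (pvM exp.toList.length _ le_rfl hfd _ []).symm
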